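-- pv_equiv track=rewrite | github.com/UoY-RoboStar/robochart-ann-components | Semantics/CSP/python_semantic_generation/inactivation_semantic_extraction.py | print_converted_weights
-- ===== SOURCE A (Python) =====
-- def print_converted_weights(weights):
--     s = "weights = \n "
--     #The constant formula, for all of them, for the activity semantics:
--     s += "<"
--     for l in range(0, len(weights)):
--         #New DNF for every list,
--         s += "<"
--         for n in range(0, len(weights[l])):
--             s += "<"
--             for i in range(0, len(weights[l][n])):
--                 if(weights[l][n][i] > 0):
--                     s += "Active"
--                 else:
--                     s += "InActive"
--                 if(i != len(weights[l][n])-1):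
--                      s += ","
--                 else:
--                      s += ">"
--             if(n != len(weights[l])-1):
--                  s += ","
--             else:
--                  s += ">"
--         if(l != len(weights)-1):
--              s += ","
--         else:
--              s += ">"
--     return s
-- ===== SOURCE B (Python) =====
-- def print_converted_weights(weights):
--     def fmt(lst, depth):
--         out = "<"
--         last = len(lst) - 1
--         for i, e in enumerate(lst):
--             if depth == 2:
--                 out += "Active" if e > 0 else "InActive"
--             else:
--                 out += fmt(e, depth + 1)
--             out += "," if i != last else ">"
--         return out
--     return "weights = \n " + fmt(weights, 0)
-- ===== Notes on version B (the rewrite author's own statement) =====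
-- stated objective: simpler
-- what changed: Replaced the three hard-coded nested index loops with a single recursive formatter fmt(lst, depth) that dispatches on depth and iterates with enumerate, eliminating the repeated index/length bookkeeping.
import Mathlib
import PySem

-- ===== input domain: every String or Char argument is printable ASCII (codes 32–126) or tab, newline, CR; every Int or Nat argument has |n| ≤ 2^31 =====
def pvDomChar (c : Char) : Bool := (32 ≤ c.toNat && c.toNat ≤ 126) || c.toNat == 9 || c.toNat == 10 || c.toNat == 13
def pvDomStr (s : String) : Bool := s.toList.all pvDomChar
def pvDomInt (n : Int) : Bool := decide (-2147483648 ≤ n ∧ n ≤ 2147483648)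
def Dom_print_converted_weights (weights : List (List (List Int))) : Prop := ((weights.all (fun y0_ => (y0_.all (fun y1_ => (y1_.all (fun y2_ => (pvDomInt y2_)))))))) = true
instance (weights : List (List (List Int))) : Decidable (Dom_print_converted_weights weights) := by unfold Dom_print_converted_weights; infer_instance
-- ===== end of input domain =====

-- B replaces A's three hard-coded nested index loops by one recursive depth-dispatched formatter (objective: simpler); equal output everywhere, including A's unbalanced-'<' output on empty (sub)lists.

-- ===== PORT A =====
def print_converted_weights (weights : List (List (List Int))) : String :=
  let s := "weights = \n "
  let s := s ++ "<"
  (PySem.List.pyRange 0 (weights.length : Int) 1).foldl (fun s l =>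
    let s := s ++ "<"
    let wl := PySem.List.pyGetD weights l []
    let s := (PySem.List.pyRange 0 (wl.length : Int) 1).foldl (fun s n =>
      let s := s ++ "<"
      let wln := PySem.List.pyGetD wl n []
      let s := (PySem.List.pyRange 0 (wln.length : Int) 1).foldl (fun s i =>
        let s := if PySem.List.pyGetD wln i 0 > 0 then s ++ "Active" else s ++ "InActive"
        if i ≠ (wln.length : Int) - 1 then s ++ "," else s ++ ">") s
      if n ≠ (wl.length : Int) - 1 then s ++ "," else s ++ ">") s
    if l ≠ (weights.length : Int) - 1 then s ++ "," else s ++ ">") s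

-- ===== PORT B =====
-- Source B's fmt(lst, depth) dispatches on depth; in typed Lean that is three copies, one per depth.
def fmt2 (lst : List Int) : String :=
  (PySem.List.enumerate lst).foldl (fun out p =>
    (out ++ (if p.2 > 0 then "Active" else "InActive")) ++
    (if p.1 ≠ (lst.length : Int) - 1 then "," else ">")) "<"

def fmt1 (lst : List (List Int)) : String :=
  (PySem.List.enumerate lst).foldl (fun out p =>
    (out ++ fmt2 p.2) ++
    (if p.1 ≠ (lst.length : Int) - 1 then "," else ">")) "<"

def fmt0 (lst : List (List (List Int))) : String :=
  (PySem.List.enumerate lst).foldl (fun out p =>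
    (out ++ fmt1 p.2) ++
    (if p.1 ≠ (lst.length : Int) - 1 then "," else ">")) "<"

def print_converted_weights_alt (weights : List (List (List Int))) : String :=
  "weights = \n " ++ fmt0 weights

-- ===== PRECONDITION & SPEC =====
def Spec_print_converted_weights (weights : List (List (List Int))) (out : String) : Prop := out = print_converted_weights_alt weights
instance (weights : List (List (List Int))) (out : String) : Decidable (Spec_print_converted_weights weights out) := by unfold Spec_print_converted_weights; infer_instance

-- ===== CLAIM (what is proved, stated in full; the proofs are below) =====
def Claim_equal_print_converted_weights : Prop := ∀ (weights : List (List (List Int))), Dom_print_converted_weights weights → Spec_print_converted_weights weights (print_converted_weights weights)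

-- ===== LEMMAS AND PROOFS =====

-- a fold whose body only appends to the accumulator factors the initial string out
lemma foldl_factor {α : Type} (g h : α → String) (l : List α) (a b : String) :
    l.foldl (fun s x => (s ++ g x) ++ h x) (a ++ b)
      = a ++ l.foldl (fun s x => (s ++ g x) ++ h x) b := by
  induction l generalizing b with
  | nil => simp
  | cons x xs ih =>
    rw [List.foldl_cons, List.foldl_cons]
    have heq : ((a ++ b) ++ g x) ++ h x = a ++ ((b ++ g x) ++ h x) := by
      simp [String.append_assoc]
    rw [heq]
    exact ih ((b ++ g x) ++ h x)

lemma lvl2 (xs : List Int) (init : String) :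
    (PySem.List.pyRange 0 (xs.length : Int) 1).foldl (fun s i =>
        let s := if PySem.List.pyGetD xs i 0 > 0 then s ++ "Active" else s ++ "InActive"
        if i ≠ (xs.length : Int) - 1 then s ++ "," else s ++ ">") init
      = (PySem.List.enumerate xs).foldl (fun out p =>
          (out ++ (if p.2 > 0 then "Active" else "InActive")) ++
          (if p.1 ≠ (xs.length : Int) - 1 then "," else ">")) init := by
  rw [PySem.List.enumerate_eq_map_pyRange (d := 0), List.foldl_map]
  apply PySem.List.foldl_congr_mem
  intro s i _
  by_cases h1 : PySem.List.pyGetD xs i 0 > 0 <;>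
    by_cases h2 : i ≠ (xs.length : Int) - 1 <;> simp [h1, h2]

lemma lvl1 (xs : List (List Int)) (init : String) :
    (PySem.List.pyRange 0 (xs.length : Int) 1).foldl (fun s n =>
        let s := s ++ "<"
        let wln := PySem.List.pyGetD xs n []
        let s := (PySem.List.pyRange 0 (wln.length : Int) 1).foldl (fun s i =>
          let s := if PySem.List.pyGetD wln i 0 > 0 then s ++ "Active" else s ++ "InActive"
          if i ≠ (wln.length : Int) - 1 then s ++ "," else s ++ ">") s
        if n ≠ (xs.length : Int) - 1 then s ++ "," else s ++ ">") init
      = (PySem.List.enumerate xs).foldl (fun out p =>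
          (out ++ fmt2 p.2) ++
          (if p.1 ≠ (xs.length : Int) - 1 then "," else ">")) init := by
  rw [PySem.List.enumerate_eq_map_pyRange (d := []), List.foldl_map]
  apply PySem.List.foldl_congr_mem
  intro s n _
  simp only [lvl2]
  have : s ++ "<" = s ++ "<" := rfl
  rw [show (s ++ "<" : String) = s ++ ("<" : String) from rfl,
    foldl_factor _ _ _ s "<"]
  by_cases h2 : n ≠ (xs.length : Int) - 1 <;> simp [h2, fmt2, String.append_assoc]

lemma lvl0 (xs : List (List (List Int))) (init : String) :
    (PySem.List.pyRange 0 (xs.length : Int) 1).foldl (fun s l =>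
        let s := s ++ "<"
        let wl := PySem.List.pyGetD xs l []
        let s := (PySem.List.pyRange 0 (wl.length : Int) 1).foldl (fun s n =>
          let s := s ++ "<"
          let wln := PySem.List.pyGetD wl n []
          let s := (PySem.List.pyRange 0 (wln.length : Int) 1).foldl (fun s i =>
            let s := if PySem.List.pyGetD wln i 0 > 0 then s ++ "Active" else s ++ "InActive"
            if i ≠ (wln.length : Int) - 1 then s ++ "," else s ++ ">") s
          if n ≠ (wl.length : Int) - 1 then s ++ "," else s ++ ">") s
        if l ≠ (xs.length : Int) - 1 then s ++ "," else s ++ ">") init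
      = (PySem.List.enumerate xs).foldl (fun out p =>
          (out ++ fmt1 p.2) ++
          (if p.1 ≠ (xs.length : Int) - 1 then "," else ">")) init := by
  rw [PySem.List.enumerate_eq_map_pyRange (d := []), List.foldl_map]
  apply PySem.List.foldl_congr_mem
  intro s l _
  simp only [lvl1]
  rw [foldl_factor _ _ _ s "<"]
  by_cases h2 : l ≠ (xs.length : Int) - 1 <;> simp [h2, fmt1, String.append_assoc]

-- ===== VERDICT (by name: the statement is the Claim_ definition above) =====
theorem print_converted_weights_spec : Claim_equal_print_converted_weights := by
  intro weights _
  unfold Spec_print_converted_weights print_converted_weights print_converted_weights_alt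
  rw [lvl0, foldl_factor _ _ _ "weights = \n " "<"]
  rfl
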